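-- pv_equiv track=rewrite | github.com/umed-hotamov/python_bmstu | sem_1/lab_11.py | to_left_side
-- ===== SOURCE A (Python) =====
-- def to_left_side(txt):
--     if current_side == 2:
--         for i in range(len(txt)):
--             counter = 0
--             for j in range(len(txt[i])):
--                 if txt[i][j] == ' ':
--                     counter += 1
--                 else:
--                     break
--             txt[i] = txt[i].replace(counter * ' ', '', 1)
--     if current_side == 3 or current_side == 1:
--         for i in range(len(txt)):
--             while '  ' in txt[i]:
--                 txt[i] = txt[i].replace('  ', ' ')
--     return txt
--
-- current_side = 1
-- ===== SOURCE B (Python) =====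
-- current_side = 1
--
-- def to_left_side(txt):
--     # single pass per line: drop a space whose previous kept char is a space
--     for i in range(len(txt)):
--         res = []
--         prev_space = False
--         for ch in txt[i]:
--             if ch == ' ' and prev_space:
--                 continue
--             res.append(ch)
--             prev_space = (ch == ' ')
--         txt[i] = ''.join(res)
--     return txt
-- ===== Notes on version B (the rewrite author's own statement) =====
-- stated objective: simpler
-- what changed: Replaces the per-line fixpoint loop of whole-string replace(' ',' ') passes (and the dead current_side==2 branch) with one linear scan per line that keeps a character unless it is a space immediately after a kept space.
import Mathlib
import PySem

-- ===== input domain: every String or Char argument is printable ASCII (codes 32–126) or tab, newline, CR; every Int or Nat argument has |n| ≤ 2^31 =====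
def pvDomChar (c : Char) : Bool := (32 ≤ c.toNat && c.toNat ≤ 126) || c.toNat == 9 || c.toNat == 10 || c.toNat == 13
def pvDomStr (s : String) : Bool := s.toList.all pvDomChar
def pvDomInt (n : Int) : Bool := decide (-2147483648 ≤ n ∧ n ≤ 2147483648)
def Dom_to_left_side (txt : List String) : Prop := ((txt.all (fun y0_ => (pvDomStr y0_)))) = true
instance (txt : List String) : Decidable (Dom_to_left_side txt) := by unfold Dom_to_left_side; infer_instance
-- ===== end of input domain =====

-- B replaces the per-line fixpoint of replace('  ',' ') passes (and the dead current_side==2 branch)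
-- with one linear scan per line (simpler); both Pythons mutate txt in place: the equivalence proved
-- here is about the returned list.


-- ===== PORT A =====
-- module-level global of the source file (current_side = 1)
def current_side : Int := 1

-- helper spec function and lemmas used ONLY by the termination proof of collapseLineA below
def rsqueeze : List Char → List Char
  | [] => []
  | [c] => [c]
  | c :: d :: t => if c = ' ' ∧ d = ' ' then ' ' :: rsqueeze t else c :: rsqueeze (d :: t)

theorem replace_go_eq (fuel : Nat) : ∀ (l acc : List Char), l.length ≤ fuel →
    PySem.Chars.replace.go [' ', ' '] [' '] fuel l acc = acc.reverse ++ rsqueeze l := by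
  induction fuel with
  | zero =>
    intro l acc h
    have hl : l = [] := List.eq_nil_of_length_eq_zero (Nat.le_zero.mp h)
    subst hl; simp [PySem.Chars.replace.go, rsqueeze]
  | succ n ih =>
    intro l acc h
    match l with
    | [] => simp [PySem.Chars.replace.go, rsqueeze]
    | [c] =>
      have : PySem.Chars.replace.go [' ', ' '] [' '] (n+1) [c] acc
           = PySem.Chars.replace.go [' ', ' '] [' '] n [] (c :: acc) := by
        simp [PySem.Chars.replace.go, List.isPrefixOf]
      rw [this, ih [] (c :: acc) (by simp)]
      simp [rsqueeze]
    | c :: d :: t =>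
      by_cases hcd : c = ' ' ∧ d = ' '
      · obtain ⟨hc, hd⟩ := hcd; subst hc; subst hd
        have : PySem.Chars.replace.go [' ', ' '] [' '] (n+1) (' ' :: ' ' :: t) acc
             = PySem.Chars.replace.go [' ', ' '] [' '] n t (' ' :: acc) := by
          simp [PySem.Chars.replace.go, List.isPrefixOf]
        rw [this, ih t (' ' :: acc) (by simp at h ⊢; omega)]
        simp [rsqueeze]
      · have hpre : [' ', ' '].isPrefixOf (c :: d :: t) = false := by
          simp [List.isPrefixOf]
          intro hc hd; exact hcd ⟨hc.symm, hd.symm⟩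
        have : PySem.Chars.replace.go [' ', ' '] [' '] (n+1) (c :: d :: t) acc
             = PySem.Chars.replace.go [' ', ' '] [' '] n (d :: t) (c :: acc) := by
          rw [PySem.Chars.replace.go]; simp [hpre]
        rw [this, ih (d :: t) (c :: acc) (by simp at h ⊢; omega)]
        simp [rsqueeze, hcd]

theorem replace_eq_rsqueeze (s : List Char) :
    PySem.Chars.replace s [' ', ' '] [' '] = rsqueeze s := by
  rw [PySem.Chars.replace]
  simp only [List.isEmpty_cons, if_neg Bool.false_ne_true]
  have := replace_go_eq s.length s [] (le_refl _)
  simpa using this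

theorem rsqueeze_length_le (s : List Char) : (rsqueeze s).length ≤ s.length := by
  induction s using rsqueeze.induct with
  | case1 => simp [rsqueeze]
  | case2 c => simp [rsqueeze]
  | case3 c d t h ih =>
    simp only [rsqueeze, if_pos h, List.length_cons]
    omega
  | case4 c d t h ih =>
    simp only [rsqueeze, if_neg h, List.length_cons]
    simp only [List.length_cons] at ih
    omega

theorem rsqueeze_length_lt (s : List Char) (hin : [' ', ' '] <:+: s) :
    (rsqueeze s).length < s.length := by
  induction s using rsqueeze.induct with
  | case1 => simp at hin
  | case2 c =>
    exact absurd hin.length_le (by norm_num)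
  | case3 c d t h ih =>
    have := rsqueeze_length_le t
    simp only [rsqueeze, if_pos h, List.length_cons]
    omega
  | case4 c d t h ih =>
    have htail : [' ', ' '] <:+: (d :: t) := by
      rcases List.infix_cons_iff.mp hin with hp | hi
      · exfalso
        rcases hp with ⟨r, hr⟩
        simp at hr
        exact h ⟨hr.1.symm, hr.2.1.symm⟩
      · exact hi
    have := ih htail
    simp only [rsqueeze, if_neg h, List.length_cons] at this ⊢
    omega

def collapseLineA (s : List Char) : List Char :=
  if h : PySem.Chars.isIn [' ', ' '] s = true then
    collapseLineA (PySem.Chars.replace s [' ', ' '] [' '])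
  else s
termination_by s.length
decreasing_by
  rw [replace_eq_rsqueeze]
  exact rsqueeze_length_lt s ((PySem.Chars.isIn_iff_infix _ _).mp h)

def countLead : List Char → Nat
  | ' ' :: t => countLead t + 1
  | _ => 0

-- s.replace(old, '', 1): remove the first occurrence of old (exact hand port of count=1 replace)
def replaceOnceEmpty (s old : List Char) : List Char :=
  let i := PySem.Chars.find s old
  if i = -1 then s else s.take i.toNat ++ s.drop (i.toNat + old.length)

def to_left_side (txt : List String) : List String :=
  let txt1 :=
    if current_side = 2 then
      txt.map (fun s => String.mk (replaceOnceEmpty s.toList (List.replicate (countLead s.toList) ' ')))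
    else txt
  if current_side = 3 ∨ current_side = 1 then
    txt1.map (fun s => String.mk (collapseLineA s.toList))
  else txt1

-- ===== PORT B =====
-- the body of B's inner loop: state (res, prev_space)
def stepB (st : List Char × Bool) (c : Char) : List Char × Bool :=
  if c == ' ' && st.2 then st else (st.1 ++ [c], c == ' ')

def to_left_side_alt (txt : List String) : List String :=
  txt.map (fun s =>
    String.mk ((s.toList.foldl stepB (([] : List Char), false)).1))

-- ===== PRECONDITION & SPEC =====
def Spec_to_left_side (txt : List String) (out : List String) : Prop := out = to_left_side_alt txt
instance (txt : List String) (out : List String) : Decidable (Spec_to_left_side txt out) := by unfold Spec_to_left_side; infer_instance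

-- ===== CLAIM (what is proved, stated in full; the proofs are below) =====
def Claim_equal_to_left_side : Prop := ∀ (txt : List String), Dom_to_left_side txt → Spec_to_left_side txt (to_left_side txt)

-- ===== LEMMAS AND PROOFS =====

-- recursive form of B's inner loop
def collapseRec : Bool → List Char → List Char
  | _, [] => []
  | p, c :: t => if c == ' ' && p then collapseRec p t else c :: collapseRec (c == ' ') t

theorem foldl_collapse (s : List Char) : ∀ (acc : List Char) (p : Bool),
    (s.foldl stepB (acc, p)).1 = acc ++ collapseRec p s := by
  induction s with
  | nil => intro acc p; simp [collapseRec]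
  | cons c t ih =>
    intro acc p
    rw [List.foldl_cons]
    have hstep : stepB (acc, p) c
        = if (c == ' ' && p) = true then (acc, p) else (acc ++ [c], c == ' ') := rfl
    by_cases h : (c == ' ' && p) = true
    · rw [hstep, if_pos h, ih]
      simp only [collapseRec]
      rw [if_pos h]
    · rw [hstep, if_neg h, ih]
      simp only [collapseRec]
      rw [if_neg h]
      simp

theorem collapseRec_rsqueeze (s : List Char) : ∀ (p : Bool),
    collapseRec p (rsqueeze s) = collapseRec p s := by
  induction s using rsqueeze.induct with
  | case1 => intro p; simp [rsqueeze]
  | case2 c => intro p; simp [rsqueeze]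
  | case3 c d t h ih =>
    intro p
    obtain ⟨hc, hd⟩ := h; subst hc; subst hd
    cases p with
    | false => simp [rsqueeze, collapseRec, ih]
    | true => simp [rsqueeze, collapseRec, ih]
  | case4 c d t h ih =>
    intro p
    simp only [rsqueeze, if_neg h]
    by_cases hc : (c == ' ' && p) = true
    · conv_lhs => rw [collapseRec]
      conv_rhs => rw [collapseRec]
      rw [if_pos hc, if_pos hc, ih]
    · conv_lhs => rw [collapseRec]
      conv_rhs => rw [collapseRec]
      rw [if_neg hc, if_neg hc, ih]

theorem collapseRec_of_no_double (s : List Char) (hno : ¬ ([' ', ' '] <:+: s)) :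
    collapseRec false s = s ∧ (s.head? ≠ some ' ' → collapseRec true s = s) := by
  induction s with
  | nil => simp [collapseRec]
  | cons c t ih =>
    have hnt : ¬ ([' ', ' '] <:+: t) := fun h => hno (h.trans ((List.suffix_cons c t).isInfix))
    obtain ⟨ih1, ih2⟩ := ih hnt
    constructor
    · simp only [collapseRec, Bool.and_false, if_neg Bool.false_ne_true]
      by_cases hc : c = ' '
      · subst hc
        have hth : t.head? ≠ some ' ' := by
          intro hh
          cases t with
          | nil => simp at hh
          | cons d t' =>
            simp at hh; subst hh
            exact hno ⟨[], t', by simp⟩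
        simp [ih2 hth]
      · have : (c == ' ') = false := by simp [hc]
        rw [this]; rw [ih1]
    · intro hh
      have hc : c ≠ ' ' := by intro h; subst h; simp at hh
      have hcb : (c == ' ') = false := by simp [hc]
      simp only [collapseRec, hcb, Bool.false_and, if_neg Bool.false_ne_true]
      rw [ih1]

theorem lineA_eq (s : List Char) : collapseLineA s = collapseRec false s := by
  rw [collapseLineA]
  by_cases h : PySem.Chars.isIn [' ', ' '] s = true
  · rw [dif_pos h, replace_eq_rsqueeze]
    rw [lineA_eq (rsqueeze s)]
    exact collapseRec_rsqueeze s false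
  · rw [dif_neg h]
    exact ((collapseRec_of_no_double s
      ((PySem.Chars.isIn_eq_false_iff _ _).mp (by simpa using h))).1).symm
termination_by s.length
decreasing_by
  exact rsqueeze_length_lt s ((PySem.Chars.isIn_iff_infix _ _).mp h)

-- ===== VERDICT (by name: the statement is the Claim_ definition above) =====
theorem to_left_side_spec : Claim_equal_to_left_side := by
  intro txt _
  unfold Spec_to_left_side to_left_side to_left_side_alt current_side
  norm_num
  intro s _
  rw [lineA_eq, foldl_collapse]
  simp
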